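-- pv_equiv track=rewrite | github.com/sresis/practice-problems | lazy-lemmings/lemmings.py | furthest
-- ===== SOURCE A (Python) =====
-- def furthest(num_holes, cafes):
--     """Find longest distance between a hole and a cafe."""
--     # make list of all numbers in range
--     # get the min distance for each number
--     # get the max min distance
--     all_nums = []
--     for i in range(0, num_holes):
--         all_nums.append(i)
--     all_diffs = []
--     for i in range(len(all_nums)):
--         min_dist = float('inf')
--         for j in range(len(cafes)):
--
--             diff = abs(cafes[j] - all_nums[i])
--             if diff < min_dist:
--                 min_dist = diff
--         if min_dist != float('inf'):
--             all_diffs.append(min_dist)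
--     if all_diffs == []:
--         return 0
--     return max(all_diffs)
-- ===== SOURCE B (Python) =====
-- def furthest(num_holes, cafes):
--     """Find longest distance between a hole and a cafe."""
--     if num_holes <= 0 or not cafes:
--         return 0
--     s = sorted(cafes)
--     best = 0
--     j = 0
--     for h in range(num_holes):
--         # nearest cafe index only moves right as h grows
--         while j + 1 < len(s) and abs(s[j + 1] - h) <= abs(s[j] - h):
--             j += 1
--         best = max(best, abs(s[j] - h))
--     return best
-- ===== Notes on version B (the rewrite author's own statement) =====
-- stated objective: faster
-- what changed: Replaces A's nested scan (for every hole, a full pass over all cafes) by sorting the cafes once and a single two-pointer sweep over the holes, the nearest-cafe pointer only ever moving forward.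
import Mathlib
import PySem

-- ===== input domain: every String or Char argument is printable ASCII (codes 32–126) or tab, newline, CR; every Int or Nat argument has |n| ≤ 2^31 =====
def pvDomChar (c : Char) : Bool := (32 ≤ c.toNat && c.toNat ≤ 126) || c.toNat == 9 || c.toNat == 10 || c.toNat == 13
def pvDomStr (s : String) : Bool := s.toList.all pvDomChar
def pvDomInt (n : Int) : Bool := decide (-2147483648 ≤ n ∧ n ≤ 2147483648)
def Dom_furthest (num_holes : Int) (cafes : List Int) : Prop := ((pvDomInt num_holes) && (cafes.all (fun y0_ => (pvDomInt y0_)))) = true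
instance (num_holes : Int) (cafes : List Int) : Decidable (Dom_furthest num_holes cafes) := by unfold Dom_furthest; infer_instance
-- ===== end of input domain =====

-- B replaces A's hole×cafe nested scan by sort-the-cafes + one two-pointer sweep (O((n+m) log m) vs O(n·m)).

-- ===== PORT A =====
-- inner loop of A: min_dist over cafes, `none` plays float('inf')
def aMinDist (cafes : List Int) (x : Int) : Option Int :=
  cafes.foldl (fun md c =>
    let diff := |c - x|
    match md with
    | none => some diff
    | some m => if diff < m then some diff else some m) none

def furthest (num_holes : Int) (cafes : List Int) : Int :=
  let all_nums := PySem.List.pyRange 0 num_holes 1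
  let all_diffs := all_nums.foldl (fun acc x =>
    match aMinDist cafes x with
    | some m => acc ++ [m]
    | none => acc) ([] : List Int)
  if all_diffs = [] then 0
  else
    match PySem.List.max? all_diffs (fun d => d) with
    | some m => m
    | none => 0

-- ===== PORT B =====
-- the while loop: advance j while the next sorted cafe is at least as close to h
def bAdvance (s : List Int) (h : Int) (j : Nat) : Nat :=
  if _hc : j + 1 < s.length ∧ |s.getD (j+1) 0 - h| ≤ |s.getD j 0 - h| then
    bAdvance s h (j+1)
  else j
termination_by s.length - j
decreasing_by omega

-- the for loop over holes h, h+1, …  (r holes left), carrying pointer j and best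
def bSweep (s : List Int) : Nat → Int → Nat → Int → Int
  | 0, _, _, best => best
  | r+1, h, j, best =>
    let j' := bAdvance s h j
    bSweep s r (h+1) j' (max best |s.getD j' 0 - h|)

def furthest_alt (num_holes : Int) (cafes : List Int) : Int :=
  if num_holes ≤ 0 ∨ cafes = [] then 0
  else bSweep (PySem.List.sorted cafes (fun x => x)) num_holes.toNat 0 0 0

-- ===== PRECONDITION & SPEC =====
def Spec_furthest (num_holes : Int) (cafes : List Int) (out : Int) : Prop := out = furthest_alt num_holes cafes
instance (num_holes : Int) (cafes : List Int) (out : Int) : Decidable (Spec_furthest num_holes cafes out) := by unfold Spec_furthest; infer_instance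

-- ===== CLAIM (what is proved, stated in full; the proofs are below) =====
def Claim_equal_furthest : Prop := ∀ (num_holes : Int) (cafes : List Int), Dom_furthest num_holes cafes → Spec_furthest num_holes cafes (furthest num_holes cafes)

-- ===== LEMMAS AND PROOFS =====

-- the common yardstick: min distance from x to a member of l, as Python's min would compute it
def mdist (l : List Int) (x : Int) : Option Int := (l.map (fun c => |c - x|)).min?

def dval (l : List Int) (x : Int) : Int := (mdist l x).getD 0

-- invariant of B's pointer: every advance made so far is justified for the current hole h
def InvJ (s : List Int) (h : Int) (j : Nat) : Prop :=
  j < s.length ∧ ∀ k, k + 1 ≤ j → (s.getD k 0 = s.getD (k+1) 0 ∨ s.getD k 0 + s.getD (k+1) 0 ≤ 2*h)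

-- tent arithmetic
lemma tent_step {x y h : Int} (hxy : x ≤ y) (hs : x = y ∨ x + y ≤ 2*h) :
    |y - h| ≤ |x - h| := by
  rcases abs_cases (y - h) with ⟨e1, _⟩ | ⟨e1, _⟩ <;>
    rcases abs_cases (x - h) with ⟨e2, _⟩ | ⟨e2, _⟩ <;> omega

lemma tent_adv {x y h : Int} (hxy : x ≤ y) (hle : |y - h| ≤ |x - h|) :
    x = y ∨ x + y ≤ 2*h := by
  rcases abs_cases (y - h) with ⟨e1, _⟩ | ⟨e1, _⟩ <;>
    rcases abs_cases (x - h) with ⟨e2, _⟩ | ⟨e2, _⟩ <;> omega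

lemma tent_stop {x y h : Int} (hxy : x ≤ y) (hgt : |x - h| < |y - h|) :
    2*h < x + y := by
  rcases abs_cases (y - h) with ⟨e1, _⟩ | ⟨e1, _⟩ <;>
    rcases abs_cases (x - h) with ⟨e2, _⟩ | ⟨e2, _⟩ <;> omega

lemma tent_suffix {x y z h : Int} (hxy : x ≤ y) (hyz : y ≤ z) (hsum : 2*h < x + y) :
    |x - h| ≤ |z - h| := by
  rcases abs_cases (z - h) with ⟨e1, _⟩ | ⟨e1, _⟩ <;>
    rcases abs_cases (x - h) with ⟨e2, _⟩ | ⟨e2, _⟩ <;> omega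

-- A's inner loop is min? of the mapped distances
lemma aMinDist_go (x : Int) (cs : List Int) : ∀ m : Int,
    cs.foldl (fun md c =>
      let diff := |c - x|
      match md with
      | none => some diff
      | some m => if diff < m then some diff else some m) (some m)
      = some ((cs.map (fun c => |c - x|)).foldl min m) := by
  induction cs with
  | nil => intro m; rfl
  | cons c cs ih =>
    intro m
    simp only [List.foldl_cons, List.map_cons]
    rcases lt_or_ge |c - x| m with hlt | hge
    · rw [show (if |c - x| < m then some |c - x| else some m) = some (min m |c - x|) by
        rw [min_eq_right (le_of_lt hlt)]; simp [hlt], ih]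
    · rw [show (if |c - x| < m then some |c - x| else some m) = some (min m |c - x|) by
        rw [min_eq_left hge]; simp [not_lt.mpr hge], ih]

lemma aMinDist_eq_mdist (cafes : List Int) (x : Int) :
    aMinDist cafes x = mdist cafes x := by
  cases cafes with
  | nil => rfl
  | cons c cs =>
    simp only [aMinDist, mdist, List.foldl_cons, List.map_cons, List.min?_cons']
    exact aMinDist_go x cs |c - x|

lemma mdist_perm {l₁ l₂ : List Int} (hp : l₁.Perm l₂) (x : Int) :
    mdist l₁ x = mdist l₂ x := by
  have hmp : (l₁.map (fun c => |c - x|)).Perm (l₂.map (fun c => |c - x|)) := hp.map _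
  unfold mdist
  cases h1 : (l₁.map (fun c => |c - x|)).min? with
  | none =>
    rw [List.min?_eq_none_iff] at h1
    have h2 : l₂.map (fun c => |c - x|) = [] := ((h1 ▸ hmp).symm.eq_nil)
    rw [h2, List.min?_nil]
  | some m =>
    rw [List.min?_eq_some_iff] at h1
    exact (List.min?_eq_some_iff.mpr ⟨hmp.mem_iff.mp h1.1, fun b hb => h1.2 b (hmp.mem_iff.mpr hb)⟩).symm

-- B's while loop: specification of bAdvance
lemma bAdvance_spec (s : List Int) (h : Int)
    (hmono : ∀ p q : Nat, p ≤ q → q < s.length → s.getD p 0 ≤ s.getD q 0) :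
    ∀ j, InvJ s h j →
      InvJ s h (bAdvance s h j) ∧
      (bAdvance s h j + 1 = s.length ∨
        |s.getD (bAdvance s h j) 0 - h| < |s.getD (bAdvance s h j + 1) 0 - h|) := by
  intro j
  induction j using (bAdvance.induct s h) with
  | case1 j hc ih =>
    intro hInv
    rw [bAdvance, dif_pos hc]
    apply ih
    refine ⟨hc.1, fun k hk => ?_⟩
    rcases Nat.lt_or_ge k j with hkj | hkj
    · exact hInv.2 k (by omega)
    · have hkj' : k = j := by omega
      subst hkj'
      exact tent_adv (hmono k (k+1) (by omega) hc.1) hc.2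
  | case2 j hc =>
    intro hInv
    have hjlen := hInv.1
    rw [bAdvance, dif_neg hc]
    rw [not_and_or, not_lt] at hc
    rcases Nat.lt_or_ge (j+1) s.length with hl | hl
    · rcases hc with hc | hc
      · omega
      · exact ⟨hInv, Or.inr (lt_of_not_ge (fun hle => hc hle))⟩
    · exact ⟨hInv, Or.inl (by omega)⟩

-- at a stopped pointer, s[j] is closest to h among all of s
lemma min_at (s : List Int) (h : Int) (j : Nat)
    (hmono : ∀ p q : Nat, p ≤ q → q < s.length → s.getD p 0 ≤ s.getD q 0)
    (hInv : InvJ s h j)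
    (hstop : j + 1 = s.length ∨ |s.getD j 0 - h| < |s.getD (j+1) 0 - h|) :
    ∀ k, k < s.length → |s.getD j 0 - h| ≤ |s.getD k 0 - h| := by
  obtain ⟨hjlen, hI2⟩ := hInv
  have hchain : ∀ d k : Nat, k + d = j → |s.getD j 0 - h| ≤ |s.getD k 0 - h| := by
    intro d
    induction d with
    | zero => intro k hk; rw [show k = j by omega]
    | succ d ih =>
      intro k hk
      refine le_trans (ih (k+1) (by omega)) ?_
      exact tent_step (hmono k (k+1) (by omega) (by omega)) (hI2 k (by omega))
  intro k hk
  rcases Nat.lt_or_ge j k with hkj | hkj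
  · rcases hstop with hlen | hgt
    · omega
    · have hsum := tent_stop (hmono j (j+1) (by omega) (by omega)) hgt
      exact tent_suffix (hmono j (j+1) (by omega) (by omega))
        (hmono (j+1) k (by omega) hk) hsum
  · exact hchain (j - k) k (by omega)

lemma mdist_at (s : List Int) (h : Int) (j : Nat) (hj : j < s.length)
    (hmin : ∀ k, k < s.length → |s.getD j 0 - h| ≤ |s.getD k 0 - h|) :
    mdist s h = some |s.getD j 0 - h| := by
  unfold mdist
  rw [List.min?_eq_some_iff]
  constructor
  · exact List.mem_map.mpr ⟨s.getD j 0, by rw [List.getD_eq_getElem _ _ hj]; exact List.getElem_mem hj, rfl⟩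
  · intro b hb
    obtain ⟨c, hc, rfl⟩ := List.mem_map.mp hb
    obtain ⟨k, hk, rfl⟩ := List.mem_iff_getElem.mp hc
    rw [← List.getD_eq_getElem _ 0 hk]
    exact hmin k hk

lemma invj_mono {s : List Int} {h : Int} {j : Nat} (hI : InvJ s h j) : InvJ s (h+1) j :=
  ⟨hI.1, fun k hk => (hI.2 k hk).imp id (by omega)⟩

-- B's for loop in closed form
lemma bSweep_eq (s : List Int)
    (hmono : ∀ p q : Nat, p ≤ q → q < s.length → s.getD p 0 ≤ s.getD q 0) :
    ∀ (r : Nat) (h : Int) (j : Nat) (best : Int), InvJ s h j →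
      bSweep s r h j best
        = ((PySem.List.pyRange h (h + r) 1).map (fun x => dval s x)).foldl max best := by
  intro r
  induction r with
  | zero =>
    intro h j best _
    rw [PySem.List.pyRange_one_eq_nil (by omega)]
    rfl
  | succ r ih =>
    intro h j best hInv
    obtain ⟨hI', hstop⟩ := bAdvance_spec s h hmono j hInv
    have hd : dval s h = |s.getD (bAdvance s h j) 0 - h| := by
      unfold dval
      rw [mdist_at s h _ hI'.1 (min_at s h _ hmono hI' hstop)]
      rfl
    have hrange : PySem.List.pyRange h (h + (r+1 : Nat)) 1
        = h :: PySem.List.pyRange (h+1) ((h+1) + r) 1 := by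
      rw [PySem.List.pyRange_one_cons (by omega)]
      congr 1
      push_cast; ring_nf
    rw [show bSweep s (r+1) h j best
        = bSweep s r (h+1) (bAdvance s h j) (max best |s.getD (bAdvance s h j) 0 - h|) from rfl,
      ih (h+1) _ _ (invj_mono hI'), hrange]
    simp [hd]

-- foldl max bounds
lemma foldl_max_le {l : List Int} {m : Int} (init : Int) (hinit : init ≤ m)
    (hall : ∀ x ∈ l, x ≤ m) : l.foldl max init ≤ m := by
  induction l generalizing init with
  | nil => exact hinit
  | cons a l ih =>
    exact ih _ (max_le hinit (hall a List.mem_cons_self)) (fun x hx => hall x (List.mem_cons_of_mem a hx))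


-- Python max(l) for a nonempty list of nonnegatives is foldl max 0
lemma pymax_eq_foldl {l : List Int} {m : Int}
    (hmax : PySem.List.max? l (fun d => d) = some m) (hpos : ∀ x ∈ l, 0 ≤ x) :
    m = l.foldl max 0 := by
  have hmem := PySem.List.max?_mem hmax
  have hub := PySem.List.max?_isMax hmax
  exact le_antisymm ((PySem.List.le_foldl_max l 0).2 m hmem)
    (foldl_max_le 0 (hpos m hmem) (fun x hx => hub x hx))

lemma max?_isSome_of_ne_nil {l : List Int} (h : l ≠ []) :
    ∃ m, PySem.List.max? l (fun d : Int => d) = some m := by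
  cases hm : PySem.List.max? l (fun d : Int => d) with
  | some m => exact ⟨m, rfl⟩
  | none => exact absurd ((PySem.List.max?_eq_none_iff l fun d => d).mp hm) h

lemma mdist_isSome {l : List Int} (h : l ≠ []) (x : Int) :
    ∃ m, mdist l x = some m := by
  unfold mdist
  cases hm : (l.map (fun c => |c - x|)).min? with
  | some m => exact ⟨m, rfl⟩
  | none =>
    rw [List.min?_eq_none_iff, List.map_eq_nil_iff] at hm
    exact absurd hm h

-- A in closed form (nonempty cafes, positive num_holes)
lemma furthest_eq (num_holes : Int) (cafes : List Int)
    (hn : 0 < num_holes) (hc : cafes ≠ []) :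
    furthest num_holes cafes
      = ((PySem.List.pyRange 0 num_holes 1).map (fun x => dval cafes x)).foldl max 0 := by
  simp only [furthest]
  have hstep : ∀ (acc : List Int), ∀ x ∈ PySem.List.pyRange 0 num_holes 1,
      (match aMinDist cafes x with
        | some m => acc ++ [m]
        | none => acc) = acc ++ [dval cafes x] := by
    intro acc x _
    obtain ⟨m, hm⟩ := mdist_isSome hc x
    rw [aMinDist_eq_mdist, hm]
    simp [dval, hm]
  rw [PySem.List.foldl_congr_mem _ _ _ _ hstep, PySem.List.foldl_append_singleton_eq_map,
    List.nil_append]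
  have hne : PySem.List.pyRange 0 num_holes 1 ≠ [] := by
    rw [PySem.List.pyRange_one_cons (by omega)]
    exact List.cons_ne_nil _ _
  have hne' : (PySem.List.pyRange 0 num_holes 1).map (fun x => dval cafes x) ≠ [] := by
    simpa using hne
  rw [if_neg (by simpa using hne')]
  obtain ⟨m, hm⟩ := max?_isSome_of_ne_nil hne'
  rw [hm]
  have hpos : ∀ y ∈ (PySem.List.pyRange 0 num_holes 1).map (fun x => dval cafes x), 0 ≤ y := by
    intro y hy
    obtain ⟨x, _, rfl⟩ := List.mem_map.mp hy
    obtain ⟨d, hd⟩ := mdist_isSome hc x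
    have : d ∈ cafes.map (fun c => |c - x|) := (List.min?_eq_some_iff.mp hd).1
    obtain ⟨c, _, rfl⟩ := List.mem_map.mp this
    simp [dval, hd, abs_nonneg]
  simpa using pymax_eq_foldl hm hpos

-- ===== VERDICT (by name: the statement is the Claim_ definition above) =====
theorem furthest_spec : Claim_equal_furthest := by
  intro num_holes cafes _
  unfold Spec_furthest furthest_alt
  by_cases hn : num_holes ≤ 0
  · rw [if_pos (Or.inl hn)]
    simp only [furthest]
    rw [PySem.List.pyRange_one_eq_nil (by omega)]
    rfl
  · have hn' : 0 < num_holes := by omega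
    rcases eq_or_ne cafes [] with rfl | hc
    · rw [if_pos (Or.inr rfl)]
      simp only [furthest]
      have h0 : ∀ x : Int, aMinDist ([] : List Int) x = none := fun _ => rfl
      simp [h0, List.foldl_fixed]
    · rw [if_neg (by rw [not_or]; exact ⟨hn, hc⟩)]
      set s := PySem.List.sorted cafes (fun x => x) with hs
      have hperm : s.Perm cafes := PySem.List.sorted_perm cafes (fun x => x) false
      have hsne : s ≠ [] := by
        intro h
        rw [h] at hperm
        exact hc hperm.symm.eq_nil
      have hmono : ∀ p q : Nat, p ≤ q → q < s.length → s.getD p 0 ≤ s.getD q 0 := by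
        intro p q hpq hq
        rw [List.getD_eq_getElem _ 0 (by omega), List.getD_eq_getElem _ 0 hq]
        exact PySem.List.sorted_id_getElem_mono cafes hpq (by simpa [hs] using hq)
      have hInv0 : InvJ s 0 0 := ⟨List.length_pos_iff.mpr hsne, fun k hk => by omega⟩
      rw [bSweep_eq s hmono num_holes.toNat 0 0 0 hInv0]
      have hrange : (0 : Int) + (num_holes.toNat : Int) = num_holes := by omega
      rw [hrange, furthest_eq num_holes cafes hn' hc]
      congr 1
      apply List.map_congr_left
      intro x _
      unfold dval
      rw [mdist_perm hperm x]
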